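-- pv_equiv track=rewrite | github.com/fredriksknese/ansible | modules/interface_config.py | GetMissingLinesInSection
-- ===== SOURCE A (Python) =====
-- def GetMissingLinesInSection(module,config,section,lines):
--   lines_copy=list(lines)
--   inSection = False
--   for config_line in config:
--     if config_line == section:
--       inSection = True
--       continue
--     elif config_line.startswith(' ') and inSection:
--       inSection = True
--
--       #raise Exception(config_line)
--       if config_line.strip() in lines_copy:
--         lines_copy.remove(config_line.strip())
--     else:
--       inSection=False
--   return lines_copy
-- ===== SOURCE B (Python) =====
-- def GetMissingLinesInSection(module, config, section, lines):
--     # Count how many times each stripped in-section line occurs in config;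
--     # then stream over lines once, skipping the first `need[v]` occurrences
--     # of each value v (equivalent to A's repeated first-occurrence removals).
--     need = {}
--     inSection = False
--     for config_line in config:
--         if config_line == section:
--             inSection = True
--         elif inSection and config_line.startswith(' '):
--             v = config_line.strip()
--             need[v] = need.get(v, 0) + 1
--         else:
--             inSection = False
--     out = []
--     for line in lines:
--         n = need.get(line, 0)
--         if n > 0:
--             need[line] = n - 1
--         else:
--             out.append(line)
--     return out
-- ===== Notes on version B (the rewrite author's own statement) =====
-- stated objective: alternative
-- what changed: Instead of scanning and mutating the lines list (membership test + remove) for every in-section config line, B counts removals per stripped value in one dict pass over config and then streams over lines once, skipping the first need[v] occurrences of each value.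
import Mathlib
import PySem

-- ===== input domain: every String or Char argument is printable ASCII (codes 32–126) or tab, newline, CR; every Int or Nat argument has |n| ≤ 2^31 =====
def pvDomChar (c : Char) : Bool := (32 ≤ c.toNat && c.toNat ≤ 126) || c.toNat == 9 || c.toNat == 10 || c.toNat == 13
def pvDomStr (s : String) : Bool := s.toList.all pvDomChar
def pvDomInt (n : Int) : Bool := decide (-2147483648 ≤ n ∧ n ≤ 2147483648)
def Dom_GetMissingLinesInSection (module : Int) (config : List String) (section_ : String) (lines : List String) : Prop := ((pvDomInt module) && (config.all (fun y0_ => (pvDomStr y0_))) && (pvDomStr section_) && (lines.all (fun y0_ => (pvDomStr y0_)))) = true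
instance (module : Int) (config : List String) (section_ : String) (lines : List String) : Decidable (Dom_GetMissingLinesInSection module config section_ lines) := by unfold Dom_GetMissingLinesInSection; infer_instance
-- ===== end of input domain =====

-- B replaces A's per-config-line scan-and-remove over the lines list by a dict of removal
-- counts built in one config pass plus one streaming pass over lines (objective: alternative).

-- ===== PORT A =====
-- loop body of A's 'for config_line in config' loop
def stepA (section_ : String) (st : Bool × List String) (config_line : String) : Bool × List String :=
  if config_line == section_ then (true, st.2)
  else if PySem.Str.startswith config_line " " && st.1 then
    let v := PySem.Str.strip config_line
    if st.2.contains v then (true, (PySem.List.remove? st.2 v).getD st.2)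
    else (true, st.2)
  else (false, st.2)

def GetMissingLinesInSection (module : Int) (config : List String) (section_ : String) (lines : List String) : List String :=
  (config.foldl (stepA section_) (false, lines)).2

-- ===== PORT B =====
-- loop body of B's counting pass over config
def stepCount (section_ : String) (st : Bool × PySem.Dict String Int) (config_line : String) : Bool × PySem.Dict String Int :=
  if config_line == section_ then (true, st.2)
  else if st.1 && PySem.Str.startswith config_line " " then
    let v := PySem.Str.strip config_line
    (st.1, st.2.insert v (st.2.getD v 0 + 1))
  else (false, st.2)

-- loop body of B's streaming pass over lines
def stepStream (st : PySem.Dict String Int × List String) (line : String) : PySem.Dict String Int × List String :=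
  let n := st.1.getD line 0
  if n > 0 then (st.1.insert line (n - 1), st.2)
  else (st.1, st.2 ++ [line])

def GetMissingLinesInSection_alt (module : Int) (config : List String) (section_ : String) (lines : List String) : List String :=
  let need := (config.foldl (stepCount section_) (false, PySem.Dict.empty)).2
  (lines.foldl stepStream (need, [])).2

-- ===== PRECONDITION & SPEC =====
def Spec_GetMissingLinesInSection (module : Int) (config : List String) (section_ : String) (lines : List String) (out : List String) : Prop := out = GetMissingLinesInSection_alt module config section_ lines
instance (module : Int) (config : List String) (section_ : String) (lines : List String) (out : List String) : Decidable (Spec_GetMissingLinesInSection module config section_ lines out) := by unfold Spec_GetMissingLinesInSection; infer_instance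

-- ===== CLAIM (what is proved, stated in full; the proofs are below) =====
def Claim_equal_GetMissingLinesInSection : Prop := ∀ (module : Int) (config : List String) (section_ : String) (lines : List String), Dom_GetMissingLinesInSection module config section_ lines → Spec_GetMissingLinesInSection module config section_ lines (GetMissingLinesInSection module config section_ lines)

-- ===== LEMMAS AND PROOFS =====

-- the stripped in-section config lines, in order, starting with flag b
def secLines (section_ : String) : Bool → List String → List String
  | _, [] => []
  | b, c :: rest =>
    if c == section_ then secLines section_ true rest
    else if PySem.Str.startswith c " " && b then PySem.Str.strip c :: secLines section_ true rest
    else secLines section_ false rest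

-- A's single removal step: remove first occurrence of v if present
def rmv (xs : List String) (v : String) : List String :=
  if xs.contains v then (PySem.List.remove? xs v).getD xs else xs

def removeSeq : List String → List String → List String
  | L, [] => L
  | L, s :: S => removeSeq (rmv L s) S

-- keep x unless its counter is positive (then decrement)
def fc (f : String → Int) : List String → List String
  | [] => []
  | x :: xs => if f x > 0 then fc (Function.update f x (f x - 1)) xs else x :: fc f xs

theorem foldA_eq (section_ : String) (config : List String) :
    ∀ (b : Bool) (L : List String),
    (config.foldl (stepA section_) (b, L)).2 = removeSeq L (secLines section_ b config) := by
  induction config with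
  | nil => intro b L; rfl
  | cons c rest ih =>
      intro b L
      rw [List.foldl_cons]
      by_cases h1 : (c == section_) = true
      · have hs : stepA section_ (b, L) c = (true, L) := by
          simp only [stepA]; rw [if_pos h1]
        have hsec : secLines section_ b (c :: rest) = secLines section_ true rest := by
          simp only [secLines]; rw [if_pos h1]
        rw [hs, hsec]; exact ih true L
      · by_cases h2 : (PySem.Str.startswith c " " && b) = true
        · have hs : stepA section_ (b, L) c = (true, rmv L (PySem.Str.strip c)) := by
            simp only [stepA, rmv]; rw [if_neg h1, if_pos h2]
            split <;> rfl
          have hsec : secLines section_ b (c :: rest)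
              = PySem.Str.strip c :: secLines section_ true rest := by
            simp only [secLines]; rw [if_neg h1, if_pos h2]
          rw [hs, hsec]
          simp only [removeSeq]
          exact ih true _
        · have hs : stepA section_ (b, L) c = (false, L) := by
            simp only [stepA]; rw [if_neg h1, if_neg h2]
          have hsec : secLines section_ b (c :: rest) = secLines section_ false rest := by
            simp only [secLines]; rw [if_neg h1, if_neg h2]
          rw [hs, hsec]; exact ih false L

theorem foldCount_eq (section_ : String) (config : List String) :
    ∀ (b : Bool) (d : PySem.Dict String Int) (v : String),
    ((config.foldl (stepCount section_) (b, d)).2).getD v 0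
    = d.getD v 0 + ((secLines section_ b config).count v : Int) := by
  induction config with
  | nil => intro b d v; simp [secLines]
  | cons c rest ih =>
      intro b d v
      rw [List.foldl_cons]
      by_cases h1 : (c == section_) = true
      · have hs : stepCount section_ (b, d) c = (true, d) := by
          simp only [stepCount]; rw [if_pos h1]
        have hsec : secLines section_ b (c :: rest) = secLines section_ true rest := by
          simp only [secLines]; rw [if_pos h1]
        rw [hs, hsec]; exact ih true d v
      · by_cases h2 : (PySem.Str.startswith c " " && b) = true
        · have hb : b = true := by revert h2; cases b <;> simp
          subst hb
          have h2' : (true && PySem.Str.startswith c " ") = true := by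
            rw [Bool.and_comm]; exact h2
          have hs : stepCount section_ (true, d) c
              = (true, d.insert (PySem.Str.strip c) (d.getD (PySem.Str.strip c) 0 + 1)) := by
            simp only [stepCount]; rw [if_neg h1, if_pos h2']
          have hsec : secLines section_ true (c :: rest)
              = PySem.Str.strip c :: secLines section_ true rest := by
            simp only [secLines]; rw [if_neg h1, if_pos h2]
          rw [hs, hsec, ih, PySem.Dict.getD_insert, List.count_cons]
          by_cases hv : v = PySem.Str.strip c
          · subst hv
            rw [if_pos rfl, if_pos (by simp : (PySem.Str.strip c == PySem.Str.strip c) = true)]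
            push_cast; ring
          · have hne : ¬ ((PySem.Str.strip c == v) = true) := by
              simp; exact fun h => hv h.symm
            rw [if_neg hv, if_neg hne]
            simp
        · have hb2 : ¬ ((b && PySem.Str.startswith c " ") = true) := by
            rw [Bool.and_comm]; exact h2
          have hs : stepCount section_ (b, d) c = (false, d) := by
            simp only [stepCount]; rw [if_neg h1, if_neg hb2]
          have hsec : secLines section_ b (c :: rest) = secLines section_ false rest := by
            simp only [secLines]; rw [if_neg h1, if_neg h2]
          rw [hs, hsec]; exact ih false d v

theorem foldStream_eq (lines : List String) :
    ∀ (d : PySem.Dict String Int) (out : List String),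
    (lines.foldl stepStream (d, out)).2 = out ++ fc (fun v => d.getD v 0) lines := by
  induction lines with
  | nil => intro d out; simp [fc]
  | cons x xs ih =>
      intro d out
      rw [List.foldl_cons]
      by_cases h : d.getD x 0 > 0
      · have hs : stepStream (d, out) x = (d.insert x (d.getD x 0 - 1), out) := by
          simp only [stepStream]; rw [if_pos h]
        rw [hs, ih]
        have hf : (fun v => (d.insert x (d.getD x 0 - 1)).getD v 0)
            = Function.update (fun v => d.getD v 0) x (d.getD x 0 - 1) := by
          funext v
          rw [PySem.Dict.getD_insert, Function.update_apply]
        rw [hf]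
        simp only [fc]
        rw [if_pos h]
      · have hs : stepStream (d, out) x = (d, out ++ [x]) := by
          simp only [stepStream]; rw [if_neg h]
        rw [hs, ih]
        simp only [fc]
        rw [if_neg h]
        simp

theorem rmv_cons_of_ne (x s : String) (xs : List String) (h : x ≠ s) :
    rmv (x :: xs) s = x :: rmv xs s := by
  unfold rmv
  have hx : (s == x) = false := by simp; exact fun he => h he.symm
  rw [List.contains_cons, hx, Bool.false_or]
  by_cases hc : xs.contains s = true
  · rw [if_pos hc, if_pos hc, PySem.List.remove?_cons_of_ne xs h]
    rcases hm : PySem.List.remove? xs s with _ | l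
    · rw [PySem.List.remove?_eq_none_iff] at hm
      rw [List.contains_iff_mem] at hc
      exact absurd hc hm
    · simp
  · rw [if_neg hc, if_neg hc]

theorem fc_bump (s : String) (L : List String) :
    ∀ (f : String → Int), (∀ v, 0 ≤ f v) →
    fc (Function.update f s (f s + 1)) L = fc f (rmv L s) := by
  induction L with
  | nil => intro f _; rfl
  | cons x xs ih =>
      intro f hf
      by_cases hx : x = s
      · subst hx
        have hrm : rmv (x :: xs) x = xs := by
          simp [rmv, PySem.List.remove?_cons_self]
        rw [hrm]
        have hpos : Function.update f x (f x + 1) x > 0 := by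
          rw [Function.update_self]; linarith [hf x]
        simp only [fc]
        rw [if_pos hpos]
        have hid : Function.update (Function.update f x (f x + 1)) x
                 (Function.update f x (f x + 1) x - 1) = f := by
          funext v
          by_cases hv : v = x
          · subst hv; simp [Function.update_self]
          · simp [Function.update_of_ne hv]
        rw [hid]
      · rw [rmv_cons_of_ne x s xs hx]
        have hfx : Function.update f s (f s + 1) x = f x := Function.update_of_ne hx _ _
        by_cases hp : f x > 0
        · simp only [fc]
          rw [hfx, if_pos hp, if_pos hp]
          have hcomm : Function.update (Function.update f s (f s + 1)) x (f x - 1)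
              = Function.update (Function.update f x (f x - 1)) s
                  (Function.update f x (f x - 1) s + 1) := by
            funext v
            by_cases hv : v = x
            · subst hv
              rw [Function.update_self, Function.update_of_ne hx, Function.update_self]
            · by_cases hv2 : v = s
              · subst hv2
                rw [Function.update_of_ne hv, Function.update_self, Function.update_self,
                    Function.update_of_ne (fun he => hx he.symm)]
              · rw [Function.update_of_ne hv, Function.update_of_ne hv2,
                    Function.update_of_ne hv2, Function.update_of_ne hv]
          rw [hcomm]
          have hih := ih (Function.update f x (f x - 1)) (fun v => by
            by_cases hv : v = x
            · subst hv; rw [Function.update_self]; linarith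
            · rw [Function.update_of_ne hv]; exact hf v)
          exact hih
        · simp only [fc]
          rw [hfx, if_neg hp, if_neg hp, ih f hf]

theorem fc_zero (L : List String) : fc (fun _ => (0 : Int)) L = L := by
  induction L with
  | nil => rfl
  | cons x xs ih => simp [fc, ih]

theorem removeSeq_eq_fc (S : List String) :
    ∀ (L : List String), removeSeq L S = fc (fun v => (S.count v : Int)) L := by
  induction S with
  | nil => intro L; simp only [removeSeq, List.count_nil]; exact (fc_zero L).symm
  | cons s S ih =>
      intro L
      simp only [removeSeq]
      rw [ih]
      have hkey : (fun v => (((s :: S).count v : Nat) : Int))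
          = Function.update (fun v => ((S.count v : Nat) : Int)) s ((S.count s : Int) + 1) := by
        funext v
        by_cases hv : v = s
        · subst hv; rw [Function.update_self, List.count_cons]; simp
        · have hne : ¬ ((s == v) = true) := by simp; exact fun he => hv he.symm
          rw [Function.update_of_ne hv, List.count_cons, if_neg hne, Nat.add_zero]
      rw [hkey, fc_bump s L (fun v => ((S.count v : Nat) : Int)) (fun v => Int.natCast_nonneg _)]

-- ===== VERDICT (by name: the statement is the Claim_ definition above) =====
theorem GetMissingLinesInSection_spec : Claim_equal_GetMissingLinesInSection := by
  intro module config section_ lines _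
  unfold Spec_GetMissingLinesInSection
  unfold GetMissingLinesInSection GetMissingLinesInSection_alt
  rw [foldA_eq, foldStream_eq, List.nil_append, removeSeq_eq_fc]
  congr 1
  funext v
  rw [foldCount_eq, PySem.Dict.getD_empty, zero_add]
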